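/- GENERATED by tools/from_farm_form.py from prooffarm-gif/accepted/DGifGetImageHeader.3/Proof.lean (a worked proof of the farm's unit `DGifGetImageHeader.3`,
   accepted by the verdict) — do not edit. -/
import Gif.Spec.Units.DGifGetImageHeader_3
import Gif.Spec.AllSegs
import Gif.Spec.Proved.DGifGetImageHeader_3_Lemmas

open X86 X86.User Asan ProgX.Base ProgX.Base.Spec Gif.Spec

/-!
  `DGifGetImageHeader.3` (0x108ef8 … 0x108f4e, 0x108fcb … 0x108ffe, 0x1090ce … 0x1090e3; dgif_lib.c:384-404): A BODY SEGMENT OF A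
  PROTECTED FUNCTION WITH TWO CALLS (`GifFreeMapObject`, `GifMakeMapObject`) AND FIVE CHECKS. The segment is walked in four pieces
  (Lemmas.lean) that meet at two private cuts, chained here with `ReachVia.trans`:

      108EF8H → 108F47H   `dgih3_seg_a_none` (no previous map: heap and forest unchanged) or
                          `dgih3_seg_a_some` (the previous map freed, NULL stored: `icm := none`)        assertion `dgih3_AtFlag`
      108F47H → 108F4EH | 108FDFH (ret21)   `dgih3_seg_b`: the flag; `GifMakeMapObject`                   assertion `dgih3_AtRet21`
      108FDFH → 108FFEH | 108E78H           `dgih3_seg_c`: the store that adopts the map, or the NULL arm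
-/

/-- Segment 3 of `DGifGetImageHeader` takes `Mid` at 0x108ef8 to `Mid` at 0x108f4e, to the loop head 0x108ffe, or to `Done` at 0x108e78. -/
theorem Gif.Spec.Proved.DGifGetImageHeader_3_ok : Gif.Spec.DGifGetImageHeader_3.Statement := by
  intro Lay hLay μ hμ u₀ hcode h_GifFreeMapObject h_GifMakeMapObject h_asan_store1_noabort h_asan_load8_noabort
    h_asan_store8_noabort h_asan_store4_noabort H rest frames F R e ret v hat
  -- 0x108f47 … : the same for every heap and forest the first piece ends with
  have htail : ∀ (Hc : Heap) (Fc : Forest) (w : State),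
      Gif.Spec.DGifGetImageHeader_3.dgih3_AtFlag H rest frames F R Hc Fc u₀ e ret w →
      ReachVia Lay μ ProgX.Base.WayInv w (fun w =>
        (∃ (H' : Heap) (F' : Forest), DGifGetImageHeader.Mid Gif.L.DGifGetImageHeader.at_108f4e H rest frames F R H' F' u₀ e ret w) ∨
        (∃ (H' : Heap) (F' : Forest) (m : Nat), DGifGetImageHeader.Head m H rest frames F R H' F' u₀ e ret w) ∨
        (∃ (H' : Heap) (F' : Forest), DGifGetImageHeader.Done H rest frames F R H' F' u₀ e ret w)) := by
    intro Hc Fc w hw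
    -- 0x108f47 … 0x108f4e, or the call of GifMakeMapObject … 0x108fdf
    have hmk := fun count => h_GifMakeMapObject Hc rest (DGifGetImageHeader.framesIn frames e) count
    refine (Gif.Spec.DGifGetImageHeader_3.dgih3_seg_b Lay hLay μ hμ u₀ hcode H rest frames F R e ret Hc Fc hmk w hw).trans ?_
    intro x hx
    rcases hx with hmid | ⟨H', hret⟩
    · exact ReachVia.done (Or.inl ⟨Hc, Fc, hmid⟩)
    · -- 0x108fdf … 0x108ffe (the loop head), or 0x108e78 (the allocation failed)
      refine (Gif.Spec.DGifGetImageHeader_3.dgih3_seg_c Lay hLay μ hμ u₀ hcode H rest frames F R e ret H' Fc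
        h_asan_store8_noabort h_asan_store4_noabort x hret).trans ?_
      intro y hy
      rcases hy with ⟨F', m, hhead⟩ | hdone
      · exact ReachVia.done (Or.inr (Or.inl ⟨H', F', m, hhead⟩))
      · exact ReachVia.done (Or.inr (Or.inr ⟨H', Fc, hdone⟩))
  -- 0x108ef8 … 0x108f47: is there a previous image colour map?
  cases hicm : F.icm with
  | none =>
    refine (Gif.Spec.DGifGetImageHeader_3.dgih3_seg_a_none Lay hLay μ hμ u₀ hcode H rest frames F R e ret
      h_asan_store1_noabort h_asan_load8_noabort v hat hicm).trans ?_
    intro w hw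
    exact htail H F w hw
  | some mp =>
    have hfree := h_GifFreeMapObject H rest (DGifGetImageHeader.framesIn frames e) mp.colors (3 * mp.count)
    refine (Gif.Spec.DGifGetImageHeader_3.dgih3_seg_a_some Lay hLay μ hμ u₀ hcode H rest frames F R e ret
      h_asan_store1_noabort h_asan_load8_noabort v hat mp hicm hfree h_asan_store8_noabort).trans ?_
    intro w hw
    obtain ⟨Hc, Fc, hw'⟩ := hw
    exact htail Hc Fc w hw'
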